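-- pv_equiv track=rewrite | github.com/pixelrunner/adventofcode2024 | Day 2/day2.py | part1
-- ===== SOURCE A (Python) =====
-- def part1(list_of_lines):
--     safeCount = 0
--     unsafeCount = 0
--
--     for line in list_of_lines:
--         # set up increase/decrease indicator
--         # -1 = decreasing series
--         # 1 = increasing series
--         # 0 = initialised var (not calculated any yet)
--         increaseDecrease = 0
--
--         # set safe var
--         safe = True
--
--         increasingLine = sorted(line)
--         decreasingLine = sorted(line, reverse=True)
--
--         if line == increasingLine:
--             increaseDecrease = 1
--         elif line == decreasingLine:
--             increaseDecrease = -1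
--         else:
--             safe = False
--
--
--         if safe == True:
--             # let's work out the differences
--             # if all the differences are eq to 1-3 then they are safe
--
--             # x var is the location in the list
--             x = 1
--             while x < len(line):
--                 difference = line[x] - line[x-1]
--                 if (difference * increaseDecrease) < 1 or (difference * increaseDecrease) > 3:
--                     safe = False
--                     break
--                 x += 1
--
--         if safe == True:
--             safeCount += 1
--         else:
--             unsafeCount +=1
--
--     return (safeCount, unsafeCount)
-- ===== SOURCE B (Python) =====
-- def part1(list_of_lines):
--     safeCount = 0
--     for line in list_of_lines:
--         diffs = [b - a for a, b in zip(line, line[1:])]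
--         if all(1 <= d <= 3 for d in diffs) or all(-3 <= d <= -1 for d in diffs):
--             safeCount += 1
--     return (safeCount, len(list_of_lines) - safeCount)
-- ===== Notes on version B (the rewrite author's own statement) =====
-- stated objective: faster
-- what changed: B replaces A's two sorts per line plus an index-based while loop with a single pass over the adjacent differences, checking them all against [1,3] or all against [-3,-1].
import Mathlib
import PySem

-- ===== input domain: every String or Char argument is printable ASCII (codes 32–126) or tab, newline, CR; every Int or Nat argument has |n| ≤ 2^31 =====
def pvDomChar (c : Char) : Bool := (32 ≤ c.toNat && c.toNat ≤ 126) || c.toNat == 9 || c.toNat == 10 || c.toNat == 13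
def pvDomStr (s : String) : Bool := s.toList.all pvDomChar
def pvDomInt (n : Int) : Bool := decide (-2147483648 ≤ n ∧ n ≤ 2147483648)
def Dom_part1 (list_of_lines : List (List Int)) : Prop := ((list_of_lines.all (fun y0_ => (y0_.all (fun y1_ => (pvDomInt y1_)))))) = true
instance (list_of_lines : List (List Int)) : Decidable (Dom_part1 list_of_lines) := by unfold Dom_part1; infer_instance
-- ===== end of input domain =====

-- B replaces A's per-line double sort + index while-loop by a single pass over adjacent
-- differences (all in [1,3] or all in [-3,-1]); faster per the asymptotic change O(nk log k) → O(nk).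

-- ===== PORT A =====
-- the 'while x < len(line)' loop; indices x and x-1 are always in range (1 ≤ x < len)
def part1LoopA (line : List Int) (inc : Int) (x : Nat) : Bool :=
  if _h : x < line.length then
    let difference := PySem.List.pyGetD line (x : Int) 0 - PySem.List.pyGetD line ((x : Int) - 1) 0
    if difference * inc < 1 ∨ difference * inc > 3 then false
    else part1LoopA line inc (x + 1)
  else true
termination_by line.length - x

-- the body of A's for-loop: is this line counted safe?
def part1SafeA (line : List Int) : Bool :=
  let increasingLine := PySem.List.sorted line (fun v => v) false
  let decreasingLine := PySem.List.sorted line (fun v => v) true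
  if line = increasingLine then part1LoopA line 1 1
  else if line = decreasingLine then part1LoopA line (-1) 1
  else false

def part1 (list_of_lines : List (List Int)) : List Int :=
  let p := list_of_lines.foldl
    (fun (acc : Int × Int) line =>
      if part1SafeA line then (acc.1 + 1, acc.2) else (acc.1, acc.2 + 1))
    (0, 0)
  [p.1, p.2]

-- ===== PORT B =====
-- [b - a for a, b in zip(line, line[1:])]  (line[1:] = drop 1)
def part1Diffs (line : List Int) : List Int :=
  (line.zip (line.drop 1)).map (fun p => p.2 - p.1)

def part1SafeB (line : List Int) : Bool :=
  let diffs := part1Diffs line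
  diffs.all (fun d => decide (1 ≤ d) && decide (d ≤ 3))
    || diffs.all (fun d => decide (-3 ≤ d) && decide (d ≤ -1))

def part1_alt (list_of_lines : List (List Int)) : List Int :=
  let safeCount := list_of_lines.foldl
    (fun (s : Int) line => if part1SafeB line then s + 1 else s) 0
  [safeCount, (list_of_lines.length : Int) - safeCount]

-- ===== PRECONDITION & SPEC =====
def Spec_part1 (list_of_lines : List (List Int)) (out : List Int) : Prop := out = part1_alt list_of_lines
instance (list_of_lines : List (List Int)) (out : List Int) : Decidable (Spec_part1 list_of_lines out) := by unfold Spec_part1; infer_instance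

-- ===== CLAIM (what is proved, stated in full; the proofs are below) =====
def Claim_equal_part1 : Prop := ∀ (list_of_lines : List (List Int)), Dom_part1 list_of_lines → Spec_part1 list_of_lines (part1 list_of_lines)

-- ===== LEMMAS AND PROOFS =====

-- structural form of A's while loop, on the suffix of the line it still has to check
def allOK : List Int → Int → Bool
  | a :: b :: t, inc =>
      (!(decide ((b - a) * inc < 1) || decide ((b - a) * inc > 3))) && allOK (b :: t) inc
  | _, _ => true

theorem allOK_short (l : List Int) (inc : Int) (h : l.length ≤ 1) : allOK l inc = true := by
  match l, h with
  | [], _ => rfl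
  | [a], _ => rfl

theorem loopA_eq (xs : List Int) (inc : Int) :
    ∀ x : Nat, 1 ≤ x → part1LoopA xs inc x = allOK (xs.drop (x - 1)) inc := by
  have key : ∀ (n x : Nat), xs.length - x = n → 1 ≤ x →
      part1LoopA xs inc x = allOK (xs.drop (x - 1)) inc := by
    intro n
    induction n with
    | zero =>
        intro x hn hx
        rw [part1LoopA, dif_neg (by omega), allOK_short _ _ (by simp [List.length_drop]; omega)]
    | succ n ih =>
        intro x hn hx
        have hxl : x < xs.length := by omega
        have hx1 : x - 1 < xs.length := by omega
        have hd1 : xs.drop (x - 1) = xs[x - 1] :: xs.drop ((x - 1) + 1) :=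
          List.drop_eq_getElem_cons hx1
        have hd2 : xs.drop x = xs[x] :: xs.drop (x + 1) :=
          List.drop_eq_getElem_cons hxl
        have hxx : (x - 1) + 1 = x := by omega
        rw [part1LoopA, dif_pos hxl]
        rw [hd1, hxx, hd2, allOK]
        have hg1 : PySem.List.pyGetD xs (x : Int) 0 = xs[x] := by
          rw [PySem.List.pyGetD_natCast]; exact List.getD_eq_getElem _ _ hxl
        have hg2 : PySem.List.pyGetD xs ((x : Int) - 1) 0 = xs[x - 1] := by
          have : (x : Int) - 1 = ((x - 1 : Nat) : Int) := by omega
          rw [this, PySem.List.pyGetD_natCast]; exact List.getD_eq_getElem _ _ hx1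
        simp only [hg1, hg2]
        have hrec : part1LoopA xs inc (x + 1) = allOK (xs.drop ((x + 1) - 1)) inc :=
          ih (x + 1) (by omega) (by omega)
        simp only [Nat.add_sub_cancel] at hrec
        rw [hd2] at hrec
        by_cases hc : (xs[x] - xs[x - 1]) * inc < 1 ∨ (xs[x] - xs[x - 1]) * inc > 3
        · rcases hc with hc | hc
          · simp [hc]
          · simp [hc]
        · rw [if_neg (by omega : ¬((xs[x] - xs[x - 1]) * inc < 1 ∨ (xs[x] - xs[x - 1]) * inc > 3)), hrec]
          have h1 : ¬((xs[x] - xs[x - 1]) * inc < 1) := by omega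
          have h2 : ¬((xs[x] - xs[x - 1]) * inc > 3) := by omega
          simp [h1, h2]
  intro x hx
  exact key (xs.length - x) x rfl hx

-- allOK with direction +1 is B's "all differences in [1,3]" test
theorem allOK_one (xs : List Int) :
    allOK xs 1 = (part1Diffs xs).all (fun d => decide (1 ≤ d) && decide (d ≤ 3)) := by
  induction xs with
  | nil => rfl
  | cons a t ih =>
      cases t with
      | nil => rfl
      | cons b t2 =>
          have hel : (!(decide ((b - a) * 1 < 1) || decide ((b - a) * 1 > 3)))
              = (decide (1 ≤ b - a) && decide (b - a ≤ 3)) := by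
            by_cases h1 : 1 ≤ b - a <;> by_cases h2 : b - a ≤ 3
            all_goals simp [h1, h2]
            all_goals omega
          simp only [allOK, part1Diffs, List.zip, List.drop, List.zipWith, List.map,
            List.all_cons] at ih ⊢
          rw [hel, ih]

-- allOK with direction -1 is B's "all differences in [-3,-1]" test
theorem allOK_neg_one (xs : List Int) :
    allOK xs (-1) = (part1Diffs xs).all (fun d => decide (-3 ≤ d) && decide (d ≤ -1)) := by
  induction xs with
  | nil => rfl
  | cons a t ih =>
      cases t with
      | nil => rfl
      | cons b t2 =>
          have hel : (!(decide ((b - a) * (-1) < 1) || decide ((b - a) * (-1) > 3)))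
              = (decide (-3 ≤ b - a) && decide (b - a ≤ -1)) := by
            by_cases h1 : -3 ≤ b - a <;> by_cases h2 : b - a ≤ -1
            all_goals simp [h1, h2]
            all_goals omega
          simp only [allOK, part1Diffs, List.zip, List.drop, List.zipWith, List.map,
            List.all_cons] at ih ⊢
          rw [hel, ih]

theorem chain_of_diffs (xs : List Int) (f : Int → Bool)
    (h : (part1Diffs xs).all f = true) : xs.IsChain (fun a b => f (b - a) = true) := by
  induction xs with
  | nil => exact List.IsChain.nil
  | cons a t ih =>
      cases t with
      | nil => exact List.isChain_singleton _
      | cons b t2 =>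
          simp only [part1Diffs, List.zip, List.drop, List.zipWith, List.map,
            List.all_cons, Bool.and_eq_true] at h
          refine List.isChain_cons_cons.mpr ⟨h.1, ih ?_⟩
          simp only [part1Diffs, List.zip, List.drop]
          exact h.2

-- all differences in [1,3] ⇒ the line is its own ascending sort
theorem all1_asc (xs : List Int)
    (h : (part1Diffs xs).all (fun d => decide (1 ≤ d) && decide (d ≤ 3)) = true) :
    PySem.List.sorted xs (fun v => v) false = xs := by
  apply PySem.List.sorted_eq_self_of_pairwise
  rw [← List.isChain_iff_pairwise]
  exact (chain_of_diffs xs _ h).imp (fun a b hab => by simp at hab; omega)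

-- all differences in [-3,-1] ⇒ the line is its own descending sort
theorem all2_desc (xs : List Int)
    (h : (part1Diffs xs).all (fun d => decide (-3 ≤ d) && decide (d ≤ -1)) = true) :
    PySem.List.sorted xs (fun v => v) true = xs := by
  apply PySem.List.sorted_rev_eq_self_of_pairwise
  rw [← List.isChain_iff_pairwise]
  exact (chain_of_diffs xs _ h).imp (fun a b hab => by simp at hab; omega)

theorem safeA_eq_safeB (xs : List Int) : part1SafeA xs = part1SafeB xs := by
  unfold part1SafeA part1SafeB
  by_cases hasc : xs = PySem.List.sorted xs (fun v => v) false
  · rw [if_pos hasc, loopA_eq xs 1 1 le_rfl]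
    simp only [Nat.sub_self, List.drop_zero, allOK_one]
    cases h1 : (part1Diffs xs).all (fun d => decide (1 ≤ d) && decide (d ≤ 3))
    · cases h2 : (part1Diffs xs).all (fun d => decide (-3 ≤ d) && decide (d ≤ -1))
      · simp
      · exfalso
        match xs, hasc, h1 with
        | a :: b :: t, hasc, h1 =>
          have hpw : (a :: b :: t).Pairwise (fun u v => u ≤ v) := by
            have := PySem.List.sorted_pairwise (a :: b :: t) (fun v => v) (κ := Int)
            rwa [← hasc] at this
          have hab : a ≤ b := (List.pairwise_cons.mp hpw).1 b (by simp)
          simp only [part1Diffs, List.zip, List.drop, List.zipWith, List.map,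
            List.all_cons, Bool.and_eq_true, decide_eq_true_eq] at h2
          omega
    · simp
  · by_cases hdesc : xs = PySem.List.sorted xs (fun v => v) true
    · rw [if_neg hasc, if_pos hdesc, loopA_eq xs (-1) 1 le_rfl]
      simp only [Nat.sub_self, List.drop_zero, allOK_neg_one]
      cases h1 : (part1Diffs xs).all (fun d => decide (1 ≤ d) && decide (d ≤ 3))
      · simp
      · exact absurd (all1_asc xs h1).symm hasc
    · rw [if_neg hasc, if_neg hdesc]
      cases h1 : (part1Diffs xs).all (fun d => decide (1 ≤ d) && decide (d ≤ 3))
      · cases h2 : (part1Diffs xs).all (fun d => decide (-3 ≤ d) && decide (d ≤ -1))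
        · simp [h1, h2]
        · exact absurd (all2_desc xs h2).symm hdesc
      · exact absurd (all1_asc xs h1).symm hasc

theorem fold_fst (lines : List (List Int)) : ∀ (s u : Int),
    (lines.foldl (fun (acc : Int × Int) line =>
      if part1SafeA line then (acc.1 + 1, acc.2) else (acc.1, acc.2 + 1)) (s, u)).1
    = lines.foldl (fun (t : Int) line => if part1SafeB line then t + 1 else t) s := by
  induction lines with
  | nil => intro s u; rfl
  | cons l ls ih =>
      intro s u
      have hb : part1SafeB l = part1SafeA l := (safeA_eq_safeB l).symm
      simp only [List.foldl_cons, hb]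
      by_cases h : part1SafeA l = true <;> simp only [h, if_true] <;> exact ih _ _

theorem fold_sum (lines : List (List Int)) : ∀ (s u : Int),
    (lines.foldl (fun (acc : Int × Int) line =>
      if part1SafeA line then (acc.1 + 1, acc.2) else (acc.1, acc.2 + 1)) (s, u)).2
    = s + u + (lines.length : Int)
      - (lines.foldl (fun (acc : Int × Int) line =>
          if part1SafeA line then (acc.1 + 1, acc.2) else (acc.1, acc.2 + 1)) (s, u)).1 := by
  induction lines with
  | nil => intro s u; simp
  | cons l ls ih =>
      intro s u
      simp only [List.foldl_cons]
      by_cases h : part1SafeA l = true <;> simp [h, ih] <;> ring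

-- ===== VERDICT (by name: the statement is the Claim_ definition above) =====
theorem part1_spec : Claim_equal_part1 := by
  intro lines _
  unfold Spec_part1 part1 part1_alt
  have h1 := fold_fst lines 0 0
  have h2 := fold_sum lines 0 0
  simp only [h1] at h2 ⊢
  rw [h2]
  push_cast
  ring_nf
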